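-- pv_equiv track=rewrite | github.com/Winswins22/Waterloo-CCC-Submissions | Submissions/'15/j5/py3.py | DFS
-- ===== SOURCE A (Python) =====
-- from math import ceil
--
-- numPaths = {}
--
-- def DFS (maxPiece, peopleLeft, piesLeft):
--
--     #DP Base Case
--     if (maxPiece, peopleLeft, piesLeft) in numPaths.keys():
--         return numPaths[(maxPiece, peopleLeft, piesLeft)]
--
--     #Base Case
--     if peopleLeft == 0 and piesLeft == 0:
--         return 1
--
--     #Recursion
--     ways = 0
--     maximumGive = min(piesLeft - peopleLeft + 1, maxPiece)
--     minGive = ceil(piesLeft / peopleLeft)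
--
--     for i in range (maximumGive, minGive - 1, -1):
--         ways += DFS(i, peopleLeft - 1, piesLeft - i)
--
--     numPaths[(maxPiece, peopleLeft, piesLeft)] = ways
--     return ways
-- ===== SOURCE B (Python) =====
-- def DFS(maxPiece, peopleLeft, piesLeft):
--     # Bottom-up DP: counts partitions of piesLeft into exactly peopleLeft parts,
--     # each part between 1 and maxPiece (the non-increasing distributions A enumerates),
--     # via the two-term recurrence Q(v,j,t) = Q(v-1,j,t) + Q(v,j-1,t-v).
--     m, k, n = maxPiece, peopleLeft, piesLeft
--     if k == 0:
--         return 1 if n == 0 else 0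
--     if k < 0 or n < k:
--         return 0
--     m = min(m, n - k + 1)
--     if m < 1 or m * k < n:
--         return 0
--     if k == 1:
--         return 1  # one person takes all n pieces (n <= m after the guard above)
--     g = [[1] + [0] * n] + [[0] * (n + 1) for _ in range(k)]
--     for v in range(1, m + 1):
--         new = [g[0]]
--         for j in range(1, k + 1):
--             prev = new[-1]
--             gj = g[j]
--             new.append([gj[t] + (prev[t - v] if t >= v else 0) for t in range(n + 1)])
--         g = new
--     return g[k][n]
-- ===== Notes on version B (the rewrite author's own statement) =====
-- stated objective: alternative
-- what changed: Replaces A's memoized top-down recursion, which at each state loops over every feasible piece count i and recurses, by an iterative bottom-up table over the two-term partition recurrence Q(v,j,t) = Q(v-1,j,t) + Q(v,j-1,t-v) (incrementally admitting one more piece value per outer step), with no recursion and no global cache.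
-- intended difference: For peopleLeft = 1 with piesLeft <= 0 and maxPiece >= piesLeft, A returns 1 (it accepts giving the single person a zero or negative number of pieces), while B returns 0, consistent with the at-least-one-piece-per-person rule A itself enforces whenever peopleLeft >= 2. — e.g. on DFS(0, 1, 0): A returns 1, B returns 0
import Mathlib
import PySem

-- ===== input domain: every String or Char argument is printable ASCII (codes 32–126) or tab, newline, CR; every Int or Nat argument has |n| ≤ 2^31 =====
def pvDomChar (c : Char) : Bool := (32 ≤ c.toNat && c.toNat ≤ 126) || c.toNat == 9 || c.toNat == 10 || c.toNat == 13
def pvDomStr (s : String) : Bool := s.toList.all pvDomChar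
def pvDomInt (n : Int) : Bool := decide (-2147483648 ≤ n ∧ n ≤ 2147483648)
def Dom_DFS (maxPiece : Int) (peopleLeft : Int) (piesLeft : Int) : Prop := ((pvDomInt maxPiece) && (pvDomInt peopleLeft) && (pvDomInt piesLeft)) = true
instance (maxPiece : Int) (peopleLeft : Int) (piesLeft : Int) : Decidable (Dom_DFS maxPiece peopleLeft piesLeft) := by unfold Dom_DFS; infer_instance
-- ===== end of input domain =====

-- B replaces A's memoized loop-and-recurse search by an iterative bottom-up table over a
-- two-term partition recurrence (objective: alternative algorithm; equivalence is about the
-- return value only — A additionally fills a global memo dict, B touches no global state).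

-- ===== PORT A =====
-- ceil(a / b) of Python's 'ceil(piesLeft / peopleLeft)': exact integer ceiling division.
-- Exact on Dom (|a|,|b| ≤ 2^31): a 53-bit float mantissa makes math.ceil of the float
-- quotient agree with exact ceiling division for operands of this size.
def pyCeilDiv (a b : Int) : Int := -(PySem.Int.floordiv (-a) b)

-- Fuelled transcription of A's recursion (the recursion depth is exactly peopleLeft, so
-- fuel peopleLeft.toNat + 1 reproduces every terminating run; the global memo dict only
-- caches values of this pure recursion and does not affect the returned value).
def DFSgo : Nat → Int → Int → Int → Int
  | 0, _, k, n => if k = 0 ∧ n = 0 then 1 else 0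
  | f + 1, m, k, n =>
    if k = 0 ∧ n = 0 then 1
    else
      let maximumGive := min (n - k + 1) m
      let minGive := pyCeilDiv n k
      (PySem.List.pyRange maximumGive (minGive - 1) (-1)).foldl
        (fun ways i => ways + DFSgo f i (k - 1) (n - i)) 0

def DFS (maxPiece : Int) (peopleLeft : Int) (piesLeft : Int) : Int :=
  DFSgo (peopleLeft.toNat + 1) maxPiece peopleLeft piesLeft

-- ===== PORT B =====
def DFS_alt (maxPiece : Int) (peopleLeft : Int) (piesLeft : Int) : Int :=
  let k := peopleLeft
  let n := piesLeft
  if k = 0 then (if n = 0 then 1 else 0)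
  else if k < 0 ∨ n < k then 0
  else
    let m := min maxPiece (n - k + 1)
    if m < 1 ∨ m * k < n then 0
    else if k = 1 then 1
    else
      let g0 : List (List Int) :=
        (1 :: List.replicate n.toNat 0) ::
          (PySem.List.pyRange 0 k 1).map (fun _ => List.replicate (n + 1).toNat 0)
      let g :=
        (PySem.List.pyRange 1 (m + 1) 1).foldl
          (fun g v =>
            (PySem.List.pyRange 1 (k + 1) 1).foldl
              (fun new j =>
                let prev := PySem.List.pyGetD new (-1) []
                let gj := PySem.List.pyGetD g j []
                new ++ [(PySem.List.pyRange 0 (n + 1) 1).map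
                  (fun t => PySem.List.pyGetD gj t 0 +
                    (if v ≤ t then PySem.List.pyGetD prev (t - v) 0 else 0))])
              [PySem.List.pyGetD g 0 []])
          g0
      PySem.List.pyGetD (PySem.List.pyGetD g k []) n 0

-- ===== PRECONDITION & SPEC =====
-- Pre_ excludes exactly the inputs where A raises: peopleLeft = 0 with piesLeft ≠ 0
-- (ZeroDivisionError), and peopleLeft < 0 with a nonempty first loop range, where A
-- recurses without bound (RecursionError).
def Pre_DFS (maxPiece : Int) (peopleLeft : Int) (piesLeft : Int) : Prop :=
  1 ≤ peopleLeft ∨ (peopleLeft = 0 ∧ piesLeft = 0) ∨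
    (peopleLeft < 0 ∧ min (piesLeft - peopleLeft + 1) maxPiece < pyCeilDiv piesLeft peopleLeft)
instance (maxPiece : Int) (peopleLeft : Int) (piesLeft : Int) : Decidable (Pre_DFS maxPiece peopleLeft piesLeft) := by unfold Pre_DFS; infer_instance

def pvWitness_DFS : Int × Int × Int := (3, 2, 5)

-- For peopleLeft = 1 with piesLeft ≤ 0 and maxPiece ≥ piesLeft, A returns 1 (it accepts
-- giving the single person a zero or negative number of pieces), while B returns 0,
-- consistent with the at-least-one-piece rule A itself enforces whenever peopleLeft ≥ 2.
def D_DFS (maxPiece : Int) (peopleLeft : Int) (piesLeft : Int) : Prop :=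
  peopleLeft = 1 ∧ piesLeft ≤ 0 ∧ piesLeft ≤ maxPiece
instance (maxPiece : Int) (peopleLeft : Int) (piesLeft : Int) : Decidable (D_DFS maxPiece peopleLeft piesLeft) := by unfold D_DFS; infer_instance

def Spec_DFS (maxPiece : Int) (peopleLeft : Int) (piesLeft : Int) (out : Int) : Prop :=
  ¬ D_DFS maxPiece peopleLeft piesLeft → out = DFS_alt maxPiece peopleLeft piesLeft
instance (maxPiece : Int) (peopleLeft : Int) (piesLeft : Int) (out : Int) : Decidable (Spec_DFS maxPiece peopleLeft piesLeft out) := by unfold Spec_DFS; infer_instance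

def pvDiffWitness_DFS : Int × Int × Int := (0, 1, 0)
def pvDiffWitnessOut_DFS : Int × Int := (1, 0)

-- ===== CLAIM (what is proved, stated in full; the proofs are below) =====
def Claim_unchanged_DFS : Prop := ∀ (maxPiece : Int) (peopleLeft : Int) (piesLeft : Int), Dom_DFS maxPiece peopleLeft piesLeft → Pre_DFS maxPiece peopleLeft piesLeft → Spec_DFS maxPiece peopleLeft piesLeft (DFS maxPiece peopleLeft piesLeft)
def Claim_changed_DFS : Prop := Dom_DFS (pvDiffWitness_DFS.1) (pvDiffWitness_DFS.2.1) (pvDiffWitness_DFS.2.2) ∧ Pre_DFS (pvDiffWitness_DFS.1) (pvDiffWitness_DFS.2.1) (pvDiffWitness_DFS.2.2) ∧ D_DFS (pvDiffWitness_DFS.1) (pvDiffWitness_DFS.2.1) (pvDiffWitness_DFS.2.2) ∧ DFS (pvDiffWitness_DFS.1) (pvDiffWitness_DFS.2.1) (pvDiffWitness_DFS.2.2) = pvDiffWitnessOut_DFS.1 ∧ DFS_alt (pvDiffWitness_DFS.1) (pvDiffWitness_DFS.2.1) (pvDiffWitness_DFS.2.2) = pvDiffWitnessOut_DFS.2 ∧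 pvDiffWitnessOut_DFS.1 ≠ pvDiffWitnessOut_DFS.2
def Claim_exact_DFS : Prop := ∀ (maxPiece : Int) (peopleLeft : Int) (piesLeft : Int), Dom_DFS maxPiece peopleLeft piesLeft → Pre_DFS maxPiece peopleLeft piesLeft → D_DFS maxPiece peopleLeft piesLeft → DFS maxPiece peopleLeft piesLeft ≠ DFS_alt maxPiece peopleLeft piesLeft
-- ===== LEMMAS AND PROOFS =====

-- Q v j t = number of partitions of t into exactly j parts, each part in [1, v]
-- (the two-term recurrence B tabulates: skip value v, or use one part equal to v).
def Qf : Nat → Int → Int → Int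
  | 0, j, t => if j = 0 ∧ t = 0 then 1 else 0
  | v + 1, j, t =>
    if j ≤ 0 then (if j = 0 ∧ t = 0 then 1 else 0)
    else Qf v j t + (if (v : Int) + 1 ≤ t then Qf (v + 1) (j - 1) (t - ((v : Int) + 1)) else 0)
  termination_by v j _ => (v, j.toNat)
  decreasing_by
  · exact Prod.Lex.left _ _ (Nat.lt_succ_self v)
  · exact Prod.Lex.right _ (by omega)

theorem qf_nonpos (v : Nat) (j t : Int) (hj : j ≤ 0) :
    Qf v j t = if j = 0 ∧ t = 0 then 1 else 0 := by
  cases v <;> simp [Qf, hj]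

theorem qf_row0 (v : Nat) (t : Int) : Qf v 0 t = if t = 0 then 1 else 0 := by
  cases v <;> simp [Qf]

theorem qf_succ (v : Nat) (j t : Int) (hj : 1 ≤ j) :
    Qf (v + 1) j t
      = Qf v j t + (if (v : Int) + 1 ≤ t then Qf (v + 1) (j - 1) (t - ((v : Int) + 1)) else 0) := by
  rw [Qf]; rw [if_neg (by omega)]

theorem qf_zero_neg : ∀ (v : Nat) (j t : Int), t < 0 → Qf v j t = 0 := by
  intro v j t
  induction v, j, t using Qf.induct with
  | case1 j t h => intro ht; exfalso; omega
  | case2 j t h => intro _; simp [Qf, h]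
  | case3 v j t h1 h2 => intro ht; exfalso; omega
  | case4 v j t h1 h2 => intro _; rw [qf_nonpos _ _ _ h1, if_neg h2]
  | case5 v j t h1 ih1 ih2 =>
    intro ht
    rw [qf_succ _ _ _ (by omega), ih1 ht, if_neg (by omega)]; norm_num

theorem qf_zero_lt : ∀ (v : Nat) (j t : Int), t < j → Qf v j t = 0 := by
  intro v j t
  induction v, j, t using Qf.induct with
  | case1 j t h => intro ht; exfalso; omega
  | case2 j t h => intro _; simp [Qf, h]
  | case3 v j t h1 h2 => intro ht; exfalso; omega
  | case4 v j t h1 h2 => intro _; rw [qf_nonpos _ _ _ h1, if_neg h2]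
  | case5 v j t h1 ih1 ih2 =>
    intro ht
    rw [qf_succ _ _ _ (by omega), ih1 ht]
    split_ifs with hg
    · rw [ih2 (by omega)]; norm_num
    · norm_num

theorem qf_zero_big : ∀ (v : Nat) (j t : Int), 0 ≤ j → (v : Int) * j < t → Qf v j t = 0 := by
  intro v j t
  induction v, j, t using Qf.induct with
  | case1 j t h => intro hj hb; exfalso; simp at hb; omega
  | case2 j t h => intro _ _; simp [Qf, h]
  | case3 v j t h1 h2 =>
    intro hj hb; exfalso
    rcases h2 with ⟨hj0, ht0⟩; subst hj0; subst ht0; simp at hb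
  | case4 v j t h1 h2 => intro _ _; rw [qf_nonpos _ _ _ h1, if_neg h2]
  | case5 v j t h1 ih1 ih2 =>
    intro hj hb
    push_cast at hb
    have hj1 : (1 : Int) ≤ j := by omega
    have hb' : (v : Int) * j + j < t := by nlinarith
    rw [qf_succ _ _ _ hj1, ih1 hj (by nlinarith)]
    split_ifs with hg
    · rw [ih2 (by omega) (by push_cast; nlinarith)]; norm_num
    · norm_num

theorem qf_cap_succ (v : Nat) (j t : Int) (h : t - j + 1 ≤ (v : Int)) :
    Qf (v + 1) j t = Qf v j t := by
  by_cases hj : j ≤ 0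
  · rw [qf_nonpos _ _ _ hj, qf_nonpos _ _ _ hj]
  · rw [qf_succ _ _ _ (by omega)]
    split_ifs with hg
    · rw [qf_zero_lt (v + 1) (j - 1) (t - ((v : Int) + 1)) (by omega)]; norm_num
    · norm_num

theorem qf_stable (d a : Nat) (j t : Int) (ha : t - j + 1 ≤ (a : Int)) :
    Qf (a + d) j t = Qf a j t := by
  induction d with
  | zero => rfl
  | succ d ih =>
    have : a + (d + 1) = (a + d) + 1 := by omega
    rw [this, qf_cap_succ _ _ _ (by push_cast; omega), ih]

theorem qf_cap (a b : Nat) (j t : Int) (ha : t - j + 1 ≤ (a : Int)) (hb : t - j + 1 ≤ (b : Int)) :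
    Qf a j t = Qf b j t := by
  rcases Nat.le_total a b with h | h
  · rw [show b = a + (b - a) by omega, qf_stable _ _ _ _ ha]
  · rw [show a = b + (a - b) by omega, qf_stable _ _ _ _ hb]

theorem ceil_bounds (n k : Int) (hk : 0 < k) :
    (pyCeilDiv n k - 1) * k < n ∧ n ≤ pyCeilDiv n k * k := by
  have := (PySem.Int.neg_floordiv_neg_eq_iff_of_pos (a := n) (b := k) (q := pyCeilDiv n k) hk).mp rfl
  exact this

theorem pyCeilDiv_one (n : Int) : pyCeilDiv n 1 = n := by
  have h := ceil_bounds n 1 one_pos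
  omega

theorem ceil_pos (n k : Int) (hk : 1 ≤ k) (hn : 1 ≤ n) : 1 ≤ pyCeilDiv n k := by
  have h := ceil_bounds n k (by omega)
  by_contra hc
  have hle : pyCeilDiv n k ≤ 0 := by omega
  have : pyCeilDiv n k * k ≤ 0 := mul_nonpos_of_nonpos_of_nonneg hle (by omega)
  omega

theorem tele (d : Nat) (k n : Int) (hk : 1 ≤ k) (hn : k ≤ n) :
    ((PySem.List.pyRange (pyCeilDiv n k) (pyCeilDiv n k + d) 1).map
      (fun i => Qf i.toNat (k - 1) (n - i))).sum
      = Qf (pyCeilDiv n k - 1 + d).toNat k n := by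
  have hb := ceil_bounds n k (by omega)
  have hlo : 1 ≤ pyCeilDiv n k := ceil_pos n k hk (by omega)
  set lo := pyCeilDiv n k with hlodef
  induction d with
  | zero =>
    rw [show lo + ((0:Nat):Int) = lo by push_cast; ring, PySem.List.pyRange_one_eq_nil le_rfl]
    simp only [List.map_nil, List.sum_nil]
    rw [show ((0:Nat):Int) = 0 by norm_num]
    have h1 : ((lo - 1 + 0).toNat : Int) = lo - 1 := by omega
    rw [eq_comm]
    apply qf_zero_big _ _ _ (by omega)
    rw [h1]
    calc (lo - 1) * k < n := hb.1
    _ = n := rfl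
  | succ d ih =>
    have hstep : lo + ((d:Int) + 1) = (lo + d) + 1 := by ring
    rw [show ((d+1:Nat):Int) = (d:Int)+1 by push_cast; ring, hstep,
        PySem.List.pyRange_one_succ_right (by omega), List.map_append, List.sum_append, ih]
    simp only [List.map_cons, List.map_nil, List.sum_cons, List.sum_nil, add_zero]
    -- RHS: Qf (lo - 1 + (d+1)).toNat k n
    have hM : (lo - 1 + ((d:Int) + 1)).toNat = (lo - 1 + (d:Int)).toNat + 1 := by omega
    rw [hM, qf_succ _ _ _ hk]
    have hcast : (((lo - 1 + (d:Int)).toNat : Int)) = lo - 1 + (d:Int) := by omega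
    congr 1
    by_cases hg : lo + (d:Int) ≤ n
    · rw [if_pos (by omega : ((lo - 1 + (d:Int)).toNat : Int) + 1 ≤ n)]
      have h1 : (lo + (d:Int)).toNat = (lo - 1 + (d:Int)).toNat + 1 := by omega
      rw [h1]
      congr 1
      omega
    · rw [if_neg (by omega : ¬(((lo - 1 + (d:Int)).toNat : Int) + 1 ≤ n))]
      exact qf_zero_neg _ _ _ (by omega)

theorem dfsgo_eq (f : Nat) (k m n : Int) (hf : k.toNat < f) (hk : 1 ≤ k) (hn : k ≤ n) :
    DFSgo f m k n = Qf (min (n - k + 1) m).toNat k n := by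
  induction f generalizing k m n with
  | zero => omega
  | succ f ih =>
    have hb := ceil_bounds n k (by omega)
    have hlo : 1 ≤ pyCeilDiv n k := ceil_pos n k hk (by omega)
    rw [DFSgo]
    rw [if_neg (by omega : ¬(k = 0 ∧ n = 0))]
    simp only []
    set lo := pyCeilDiv n k with hlodef
    set hi := min (n - k + 1) m with hhidef
    rw [PySem.List.foldl_add (g := fun i => DFSgo f i (k - 1) (n - i)), zero_add]
    rw [List.map_congr_left (g := fun i => Qf i.toNat (k - 1) (n - i)) ?terms]
    case terms =>
      intro i hmem
      rw [PySem.List.mem_pyRange_neg_one] at hmem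
      have hge : lo ≤ i := by omega
      have hile : i ≤ n - k + 1 := by
        have : hi ≤ n - k + 1 := min_le_left _ _
        omega
      simp only []
      rcases eq_or_lt_of_le hk with hk1 | hk2
      · -- k = 1 : the only term is i = n, a leaf of the recursion
        have hkk : k = 1 := hk1.symm
        subst hkk
        rw [pyCeilDiv_one] at hlodef
        have hieq : i = n := by omega
        subst hieq
        cases f with
        | zero => omega
        | succ f' =>
          rw [show (1:Int) - 1 = 0 by ring, show i - i = 0 by ring]
          rw [DFSgo, if_pos ⟨rfl, rfl⟩, qf_row0]
          simp
      · -- k ≥ 2 : induction hypothesis plus cap-irrelevance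
        rw [ih (k - 1) i (n - i) (by omega) (by omega) (by omega)]
        have harg : n - i - (k - 1) + 1 = n - i - k + 2 := by ring
        rw [harg]
        have ha1 : 1 ≤ n - i - k + 2 := by omega
        rcases le_total i (n - i - k + 2) with hio | hio
        · rw [min_eq_right hio]
        · rw [min_eq_left hio]
          exact qf_cap _ _ (k - 1) (n - i) (by omega) (by omega)
    rw [PySem.List.pyRange_neg_one_eq_reverse, List.map_reverse, List.sum_reverse,
        show lo - 1 + 1 = lo by ring]
    by_cases hcase : lo ≤ hi
    · rw [show hi + 1 = lo + (((hi + 1 - lo).toNat : Int)) by omega, tele _ k n hk hn]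
      congr 1
      omega
    · rw [PySem.List.pyRange_one_eq_nil (by omega : hi + 1 ≤ lo)]
      simp only [List.map_nil, List.sum_nil]
      rw [eq_comm]
      apply qf_zero_big _ _ _ (by omega)
      rcases le_total 0 hi with h0 | h0
      · have : (hi.toNat : Int) = hi := by omega
        rw [this]
        calc hi * k ≤ (lo - 1) * k := mul_le_mul_of_nonneg_right (by omega) (by omega)
          _ < n := hb.1
      · rw [show hi.toNat = 0 by omega]
        push_cast
        omega

-- B-side helpers (proof-only): named copies of the two fold bodies in DFS_alt, and the
-- intended contents of the table after admitting piece values 1..v.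
def stepB (g : List (List Int)) (n v : Int) : List (List Int) → Int → List (List Int) :=
  fun new j =>
    let prev := PySem.List.pyGetD new (-1) []
    let gj := PySem.List.pyGetD g j []
    new ++ [(PySem.List.pyRange 0 (n + 1) 1).map
      (fun t => PySem.List.pyGetD gj t 0 +
        (if v ≤ t then PySem.List.pyGetD prev (t - v) 0 else 0))]

def outerB (k n : Int) : List (List Int) → Int → List (List Int) :=
  fun g v => (PySem.List.pyRange 1 (k + 1) 1).foldl (stepB g n v) [PySem.List.pyGetD g 0 []]

def Qrow (v : Nat) (j n : Int) : List Int := (PySem.List.pyRange 0 (n + 1) 1).map (fun t => Qf v j t)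

def Grid (v : Nat) (k n : Int) : List (List Int) := (PySem.List.pyRange 0 (k + 1) 1).map (fun j => Qrow v j n)

theorem map_const_of_mem {α β : Type} (l : List α) (f : α → β) (c : β)
    (h : ∀ x ∈ l, f x = c) : l.map f = List.replicate l.length c := by
  induction l with
  | nil => rfl
  | cons x xs ih =>
    simp only [List.map_cons, List.length_cons, List.replicate_succ]
    rw [h x (by simp), ih (fun y hy => h y (by simp [hy]))]

theorem qrow0_succ (v : Nat) (n : Int) : Qrow (v + 1) 0 n = Qrow v 0 n := by
  unfold Qrow
  exact List.map_congr_left (fun t _ => by rw [qf_row0, qf_row0])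

theorem grid_get (v : Nat) (k n j : Int) (h0 : 0 ≤ j) (h1 : j < k + 1) :
    PySem.List.pyGetD (Grid v k n) j [] = Qrow v j n :=
  PySem.List.pyGetD_map_pyRange_of_nonneg _ _ _ _ h0 h1

theorem qrow_get (v : Nat) (j n t : Int) (h0 : 0 ≤ t) (h1 : t < n + 1) :
    PySem.List.pyGetD (Qrow v j n) t 0 = Qf v j t :=
  PySem.List.pyGetD_map_pyRange_of_nonneg _ _ _ _ h0 h1

theorem inner_inv (v : Nat) (k n : Int) (hn : 1 ≤ n) :
    ∀ (d : Nat), (d : Int) ≤ k →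
    (PySem.List.pyRange 1 ((d : Int) + 1) 1).foldl
        (stepB (Grid v k n) n ((v : Int) + 1)) [Qrow (v + 1) 0 n]
      = (PySem.List.pyRange 0 ((d : Int) + 1) 1).map (fun j => Qrow (v + 1) j n) := by
  intro d
  induction d with
  | zero =>
    intro _
    rw [show (((0:Nat):Int) + 1) = 0 + 1 by norm_num]
    rw [PySem.List.pyRange_one_eq_nil (by omega)]
    simp only [List.foldl_nil]
    rw [PySem.List.pyRange_one_singleton]
    rfl
  | succ d ih =>
    intro hd
    have hd' : (d : Int) ≤ k := by push_cast at hd ⊢; omega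
    rw [show (((d+1:Nat)):Int) + 1 = ((d:Int) + 1) + 1 by push_cast; ring]
    rw [PySem.List.pyRange_one_succ_right (by omega : (1:Int) ≤ (d:Int) + 1),
        List.foldl_append, ih hd']
    simp only [List.foldl_cons, List.foldl_nil]
    -- one application of stepB to the table of rows 0..d
    rw [show (stepB (Grid v k n) n ((v : Int) + 1))
          ((PySem.List.pyRange 0 ((d : Int) + 1) 1).map (fun j => Qrow (v + 1) j n)) ((d : Int) + 1)
        = (PySem.List.pyRange 0 ((d : Int) + 1) 1).map (fun j => Qrow (v + 1) j n)
            ++ [Qrow (v + 1) ((d : Int) + 1) n] from ?step]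
    · rw [show [Qrow (v + 1) ((d:Int) + 1) n]
            = List.map (fun j => Qrow (v + 1) j n) [(d:Int) + 1] from rfl,
          ← List.map_append, ← PySem.List.pyRange_one_succ_right (by omega : (0:Int) ≤ (d:Int) + 1)]
    case step =>
      unfold stepB
      simp only []
      congr 1
      -- the appended row
      have hprev : PySem.List.pyGetD
          ((PySem.List.pyRange 0 ((d : Int) + 1) 1).map (fun j => Qrow (v + 1) j n)) (-1) []
          = Qrow (v + 1) d n := by
        rw [PySem.List.pyRange_one_succ_right (by omega : (0:Int) ≤ (d:Int)), List.map_append]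
        simp only [List.map_cons, List.map_nil]
        exact PySem.List.pyGetD_neg_one_append_singleton _ _ _
      rw [hprev, grid_get v k n ((d:Int)+1) (by omega) (by omega)]
      congr 1
      refine List.map_congr_left ?_
      intro t hmem
      rw [PySem.List.mem_pyRange_one] at hmem
      rw [qrow_get v ((d:Int)+1) n t hmem.1 hmem.2]
      rw [show Qf (v + 1) ((d:Int)+1) t
            = Qf v ((d:Int)+1) t + (if (v : Int) + 1 ≤ t
                then Qf (v + 1) (((d:Int)+1) - 1) (t - ((v : Int) + 1)) else 0)
          from qf_succ v ((d:Int)+1) t (by omega)]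
      congr 1
      split_ifs with hg
      · rw [qrow_get (v+1) (d:Int) n (t - ((v:Int)+1)) (by omega) (by omega)]
        congr 2
        omega
      · rfl

theorem g0_eq (k n : Int) (hk : 1 ≤ k) (hn : 1 ≤ n) :
    ((1 :: List.replicate n.toNat 0) ::
        (PySem.List.pyRange 0 k 1).map (fun _ => List.replicate (n + 1).toNat 0))
      = Grid 0 k n := by
  unfold Grid
  rw [PySem.List.pyRange_one_cons (by omega : (0:Int) < k + 1)]
  simp only [List.map_cons]
  congr 1
  · -- row 0
    unfold Qrow
    rw [PySem.List.pyRange_one_cons (by omega : (0:Int) < n + 1)]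
    simp only [List.map_cons]
    congr 1
    · simp [Qf]
    · have hz : ∀ t ∈ PySem.List.pyRange (0+1) (n+1) 1, Qf 0 0 t = 0 := by
        intro t ht
        rw [PySem.List.mem_pyRange_one] at ht
        rw [qf_row0, if_neg (by omega)]
      rw [map_const_of_mem _ _ 0 hz, PySem.List.length_pyRange_one]
      congr 1
      omega
  · -- rows 1..k are all zero
    have hrows : ∀ j ∈ PySem.List.pyRange (0+1) (k+1) 1,
        (fun j => Qrow 0 j n) j = List.replicate (n+1).toNat (0:Int) := by
      intro j hj
      rw [PySem.List.mem_pyRange_one] at hj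
      have hz : ∀ t ∈ PySem.List.pyRange 0 (n+1) 1, Qf 0 j t = 0 := by
        intro t _
        simp only [Qf]
        rw [if_neg (by omega)]
      show List.map (fun t => Qf 0 j t) (PySem.List.pyRange 0 (n+1) 1)
          = List.replicate (n+1).toNat (0:Int)
      rw [map_const_of_mem _ _ 0 hz, PySem.List.length_pyRange_one]
      congr 1
      omega
    have h1 : List.map (fun _ : Int => List.replicate (n+1).toNat (0:Int)) (PySem.List.pyRange 0 k 1)
        = List.replicate (PySem.List.pyRange 0 k 1).length (List.replicate (n+1).toNat (0:Int)) :=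
      map_const_of_mem _ _ _ (fun _ _ => rfl)
    have h2 : List.map (fun j => Qrow 0 j n) (PySem.List.pyRange (0+1) (k+1) 1)
        = List.replicate (PySem.List.pyRange (0+1) (k+1) 1).length (List.replicate (n+1).toNat (0:Int)) :=
      map_const_of_mem _ _ _ hrows
    have hlen : (PySem.List.pyRange 0 k 1).length = (PySem.List.pyRange (0+1) (k+1) 1).length := by
      rw [PySem.List.length_pyRange_one, PySem.List.length_pyRange_one]
      congr 1
      omega
    calc List.map (fun _ : Int => List.replicate (n+1).toNat (0:Int)) (PySem.List.pyRange 0 k 1)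
        = List.replicate (PySem.List.pyRange 0 k 1).length (List.replicate (n+1).toNat (0:Int)) := h1
      _ = List.replicate (PySem.List.pyRange (0+1) (k+1) 1).length
            (List.replicate (n+1).toNat (0:Int)) := by rw [hlen]
      _ = List.map (fun j => Qrow 0 j n) (PySem.List.pyRange (0+1) (k+1) 1) := h2.symm

theorem outer_step (v : Nat) (k n : Int) (hk : 1 ≤ k) (hn : 1 ≤ n) :
    outerB k n (Grid v k n) ((v : Int) + 1) = Grid (v + 1) k n := by
  unfold outerB
  rw [grid_get v k n 0 le_rfl (by omega)]
  have h0 : Qrow v 0 n = Qrow (v + 1) 0 n := (qrow0_succ v n).symm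
  rw [h0]
  have hinner := inner_inv v k n hn k.toNat (by omega)
  rw [show ((k.toNat : Int) + 1) = k + 1 by omega] at hinner
  rw [hinner]
  rfl

theorem outer_inv (k n M : Int) (hk : 1 ≤ k) (hn : 1 ≤ n) (hM : 0 ≤ M) :
    (PySem.List.pyRange 1 (M + 1) 1).foldl (outerB k n) (Grid 0 k n) = Grid M.toNat k n := by
  obtain ⟨d, rfl⟩ : ∃ d : Nat, M = (d : Int) := ⟨M.toNat, by omega⟩
  induction d with
  | zero =>
    rw [show ((0:Nat):Int) + 1 = 1 by norm_num, PySem.List.pyRange_one_eq_nil le_rfl]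
    rfl
  | succ d ih =>
    rw [show (((d+1:Nat)):Int) + 1 = ((d:Int) + 1) + 1 by push_cast; ring,
        PySem.List.pyRange_one_succ_right (by omega : (1:Int) ≤ (d:Int) + 1),
        List.foldl_append, ih (by omega)]
    simp only [List.foldl_cons, List.foldl_nil]
    rw [show ((d:Int)).toNat = d by omega, outer_step d k n hk hn]
    congr 1

theorem qf_one (v : Nat) (n : Int) (hn : 1 ≤ n) :
    Qf v 1 n = if n ≤ (v : Int) then 1 else 0 := by
  induction v with
  | zero =>
    rw [show Qf 0 1 n = 0 by simp [Qf], if_neg (by push_cast; omega)]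
  | succ v ih =>
    rw [qf_succ v 1 n le_rfl, ih, show (1:Int) - 1 = 0 from rfl, qf_row0]
    push_cast
    rcases lt_trichotomy n ((v : Int) + 1) with h | h | h
    · rw [if_pos (by omega), if_neg (by omega), if_pos (by omega)]
      norm_num
    · rw [if_neg (by omega), if_pos (by omega), if_pos (by omega), if_pos (by omega)]
      norm_num
    · rw [if_neg (by omega), if_pos (by omega), if_neg (by omega), if_neg (by omega)]
      norm_num

theorem alt_eq (m k n : Int) (hk : 1 ≤ k) (hn : k ≤ n)
    (hm : ¬ (min m (n - k + 1) < 1 ∨ min m (n - k + 1) * k < n)) :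
    DFS_alt m k n = Qf (min m (n - k + 1)).toNat k n := by
  have hn1 : 1 ≤ n := by omega
  rw [DFS_alt]
  simp only []
  rw [if_neg (by omega : ¬ k = 0), if_neg (by omega : ¬ (k < 0 ∨ n < k)), if_neg hm]
  by_cases hk1 : k = 1
  · subst hk1
    rw [if_pos rfl, qf_one _ n hn1, if_pos (by
      have h1 : ¬ min m (n - 1 + 1) * 1 < n := by tauto
      omega)]
  · rw [if_neg hk1]
    rw [show (fun (g : List (List Int)) (v : Int) =>
          (PySem.List.pyRange 1 (k + 1) 1).foldl
            (fun new j =>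
              let prev := PySem.List.pyGetD new (-1) []
              let gj := PySem.List.pyGetD g j []
              new ++ [(PySem.List.pyRange 0 (n + 1) 1).map
                (fun t => PySem.List.pyGetD gj t 0 +
                  (if v ≤ t then PySem.List.pyGetD prev (t - v) 0 else 0))])
            [PySem.List.pyGetD g 0 []]) = outerB k n from rfl]
    rw [g0_eq k n hk hn1, outer_inv k n (min m (n - k + 1)) hk hn1 (by omega)]
    rw [grid_get _ k n k (by omega) (by omega), qrow_get _ k n n (by omega) (by omega)]

  -- ===== VERDICT (by name: the statement is the Claim_ definition above) =====
theorem DFS_spec : Claim_unchanged_DFS := by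
  intro m k n hdom hpre hnd
  show DFS m k n = DFS_alt m k n
  rcases hpre with hk1 | ⟨hk0, hn0⟩ | ⟨hkneg, hempty⟩
  · -- peopleLeft ≥ 1
    by_cases hkn : k ≤ n
    · by_cases hm : min m (n - k + 1) < 1 ∨ min m (n - k + 1) * k < n
      · -- B's feasibility guard fires; A's value is 0 as well
        rw [show DFS m k n = DFSgo (k.toNat + 1) m k n from rfl,
            dfsgo_eq (k.toNat + 1) k m n (by omega) hk1 hkn, min_comm]
        rw [show Qf (min m (n - k + 1)).toNat k n = 0 by
              apply qf_zero_big _ _ _ (by omega)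
              rcases le_total (min m (n - k + 1)) 0 with h0 | h0
              · rw [show (min m (n - k + 1)).toNat = 0 by omega]
                push_cast
                omega
              · rw [show ((min m (n - k + 1)).toNat : Int) = min m (n - k + 1) by omega]
                rcases hm with h | h
                · have hmin : min m (n - k + 1) = 0 := by omega
                  rw [hmin]
                  omega
                · exact h]
        rw [DFS_alt]
        simp only []
        rw [if_neg (by omega : ¬ k = 0), if_neg (by omega : ¬ (k < 0 ∨ n < k)), if_pos hm]
      · rw [show DFS m k n = DFSgo (k.toNat + 1) m k n from rfl,
            dfsgo_eq (k.toNat + 1) k m n (by omega) hk1 hkn,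
            alt_eq m k n hk1 hkn hm, min_comm]
    · -- n < k : both sides are 0
      have hb := ceil_bounds n k (by omega)
      have hempty2 : min (n - k + 1) m ≤ pyCeilDiv n k - 1 := by
        rcases eq_or_lt_of_le hk1 with hk1' | hk2
        · -- k = 1 (so n ≤ 0, and ¬D_ gives m < n)
          have hkk : k = 1 := hk1'.symm
          subst hkk
          rw [pyCeilDiv_one] at *
          have hmn : m < n := by
            by_contra hc
            exact hnd ⟨rfl, by omega, by omega⟩
          have : min (n - 1 + 1) m = m := by omega
          omega
        · -- k ≥ 2 : the loop range is provably empty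
          set lo := pyCeilDiv n k with hlo
          by_contra hc
          have h1 : lo ≤ n - k + 1 := by
            have := min_le_right (n - k + 1) m
            have := min_le_left (n - k + 1) m
            omega
          have h2 : lo * k ≤ (n - k + 1) * k := mul_le_mul_of_nonneg_right h1 (by omega)
          have h3 : (n - k + 1) * (k - 2) ≤ 0 :=
            mul_nonpos_of_nonpos_of_nonneg (by omega) (by omega)
          nlinarith [hb.2]
      rw [show DFS m k n = DFSgo (k.toNat + 1) m k n from rfl, DFSgo,
          if_neg (by omega : ¬ (k = 0 ∧ n = 0))]
      simp only []
      rw [PySem.List.pyRange_neg_one_eq_nil (by omega : min (n - k + 1) m ≤ pyCeilDiv n k - 1)]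
      rw [DFS_alt]
      simp only []
      rw [if_neg (by omega : ¬ k = 0), if_pos (Or.inr (by omega : n < k))]
      simp
  · -- peopleLeft = 0, piesLeft = 0
    subst hk0; subst hn0
    rw [show DFS m 0 0 = DFSgo ((0:Int).toNat + 1) m 0 0 from rfl, DFSgo, if_pos ⟨rfl, rfl⟩]
    rw [DFS_alt]
    norm_num
  · -- peopleLeft < 0 with an empty first range: A returns 0 immediately
    rw [show DFS m k n = DFSgo (k.toNat + 1) m k n from rfl,
        show k.toNat = 0 by omega, DFSgo, if_neg (by omega : ¬ (k = 0 ∧ n = 0))]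
    simp only []
    rw [PySem.List.pyRange_neg_one_eq_nil
          (by omega : min (n - k + 1) m ≤ pyCeilDiv n k - 1)]
    rw [DFS_alt]
    simp only []
    rw [if_neg (by omega : ¬ k = 0), if_pos (Or.inl hkneg)]
    simp

theorem DFS_changed : Claim_changed_DFS := by unfold Claim_changed_DFS; decide

theorem DFS_tight : Claim_exact_DFS := by
  intro m k n hdom hpre hD
  obtain ⟨hk, hn, hm⟩ := hD
  subst hk
  have hA : DFS m 1 n = 1 := by
    rw [show DFS m 1 n = DFSgo ((1:Int).toNat + 1) m 1 n from rfl,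
        show (1:Int).toNat = 1 from rfl, DFSgo, if_neg (by omega : ¬ ((1:Int) = 0 ∧ n = 0))]
    simp only []
    rw [pyCeilDiv_one, show n - 1 + 1 = n by ring, min_eq_left hm,
        PySem.List.pyRange_neg_one_cons (by omega : n - 1 < n),
        PySem.List.pyRange_neg_one_eq_nil (le_refl (n - 1))]
    simp only [List.foldl_cons, List.foldl_nil, zero_add]
    rw [show n - n = 0 by ring, DFSgo, if_pos ⟨rfl, rfl⟩]
  have hB : DFS_alt m 1 n = 0 := by
    rw [DFS_alt]
    simp only []
    rw [if_neg (by omega : ¬ (1:Int) = 0), if_pos (Or.inr (by omega : n < 1))]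
  rw [hA, hB]
  omega
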